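-- pv_equiv track=rewrite | github.com/cyrii42/advent_of_code | solutions/2025/day04.py | part_two
-- ===== SOURCE A (Python) =====
-- from enum import Enum, IntEnum
-- from typing import NamedTuple
--
-- class Direction(IntEnum):
--     NORTH = 0
--     NORTHEAST = 1
--     EAST = 2
--     SOUTHEAST = 3
--     SOUTH = 4
--     SOUTHWEST = 5
--     WEST = 6
--     NORTHWEST = 7
--
-- DIRECTION_DELTAS = {
--     Direction.NORTH: (-1, 0),
--     Direction.NORTHEAST: (-1, 1),
--     Direction.EAST: (0, 1),
--     Direction.SOUTHEAST: (1, 1),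
--     Direction.SOUTH: (1, 0),
--     Direction.SOUTHWEST: (1, -1),
--     Direction.WEST: (0, -1),
--     Direction.NORTHWEST: (-1, -1)
-- }
--
-- class NodeType(Enum):
--     OPEN = 0
--     PAPER = 1
--
-- class Node(NamedTuple):
--     row: int
--     col: int
--     node_type: NodeType
--
-- def parse_data(data: str) -> dict[tuple[int, int], Node]:
--     line_list = data.splitlines()
--     node_list: list[Node] = []
--     for row, line in enumerate(line_list):
--         for col, char in enumerate(line):
--             node_type = NodeType.PAPER if char == '@' else NodeType.OPEN
--             node_list.append(Node(row, col, node_type))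
--     node_dict = {(node.row, node.col): node for node in node_list}
--     return node_dict
--
-- def get_node_neighbor_coordinates(node: Node) -> list[tuple[int, int]]:
--     row, col = (node.row, node.col)
--
--     output_list = []
--     for dir in Direction:
--         delta_row, delta_col = DIRECTION_DELTAS[dir]
--         output_list.append((row + delta_row, col + delta_col))
--     return output_list
--
-- def create_graph(node_dict: dict[tuple[int, int], Node]) -> dict[Node, list[Node]]:
--     output_dict: dict[Node, list[Node]] = {}
--
--     for node in node_dict.values():
--         neighbor_list = []
--         for neighbor_coords in get_node_neighbor_coordinates(node):
--             try:
--                 neighbor_list.append(node_dict[neighbor_coords])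
--             except KeyError:
--                 continue
--         output_dict[node] = neighbor_list
--
--     return output_dict
--
-- def find_accessible_paper_rolls(node_dict: dict[tuple[int, int], Node]) -> list[Node]:
--     graph = create_graph(node_dict)
--     return [node for node in graph if node.node_type == NodeType.PAPER
--             and len([n for n in graph[node] if n.node_type == NodeType.PAPER]) < 4]
--
-- def part_two(data: str):
--     node_dict = parse_data(data)
--
--     rolls_removed = 0
--     while True:
--         accessible_paper_rolls = find_accessible_paper_rolls(node_dict)
--         if len(accessible_paper_rolls) == 0:
--             return rolls_removed
--
--         new_empty_nodes = [Node(node.row, node.col, NodeType.OPEN)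
--                            for node in accessible_paper_rolls]
--         for node in new_empty_nodes:
--             node_dict[(node.row, node.col)] = node
--             rolls_removed += 1
-- ===== SOURCE B (Python) =====
-- DELTAS = ((-1, 0), (-1, 1), (0, 1), (1, 1), (1, 0), (1, -1), (0, -1), (-1, -1))
--
-- def part_two(data: str):
--     papers = [(row, col) for row, line in enumerate(data.splitlines())
--               for col, char in enumerate(line) if char == '@']
--     live = set(papers)
--     stack = list(papers)
--     removed = 0
--     while stack:
--         p = stack.pop()
--         if p in live and sum((p[0] + dr, p[1] + dc) in live for dr, dc in DELTAS) < 4: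
--             live.discard(p)
--             removed += 1
--             for dr, dc in DELTAS:
--                 stack.append((p[0] + dr, p[1] + dc))
--     return removed
-- ===== Notes on version B (the rewrite author's own statement) =====
-- stated objective: faster
-- what changed: B replaces A's synchronized rounds (each round rebuilds the whole Node/graph dict and globally re-filters every cell) by an incremental worklist peel: a stack seeded with all paper cells, popping one cell at a time, removing it if it currently has <4 live paper neighbours and pushing only its 8 neighbours for re-examination; correctness rests on the order-independence (confluence) of <4-neighbour peeling, proved in Lean via the greatest-stable-subset characterisation.
import Mathlib
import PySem

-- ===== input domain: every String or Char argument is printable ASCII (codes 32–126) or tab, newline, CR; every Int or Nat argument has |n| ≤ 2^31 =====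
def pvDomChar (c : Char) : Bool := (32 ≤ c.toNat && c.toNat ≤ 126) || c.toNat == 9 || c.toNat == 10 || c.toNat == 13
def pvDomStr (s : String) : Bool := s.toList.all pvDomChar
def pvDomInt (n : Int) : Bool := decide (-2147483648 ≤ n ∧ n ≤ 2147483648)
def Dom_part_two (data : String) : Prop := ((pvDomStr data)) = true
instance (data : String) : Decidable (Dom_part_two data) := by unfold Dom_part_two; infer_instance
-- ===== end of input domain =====

-- B replaces A's synchronized rounds (full graph rebuild and global re-filter each round) by an
-- incremental worklist peel: pop one cell, remove it if it has < 4 live paper neighbours, push its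
-- neighbours; correct because < 4-neighbour peeling is order-independent (objective: faster).

-- ===== PORT A =====
-- Node is ported as (row, col, isPaper) : Int × Int × Bool (NodeType.PAPER = true, OPEN = false);
-- DIRECTION_DELTAS iterated over Direction is the fixed list of 8 (drow, dcol) deltas in enum order.
def pvDeltas : List (Int × Int) :=
  [(-1, 0), (-1, 1), (0, 1), (1, 1), (1, 0), (1, -1), (0, -1), (-1, -1)]

def pvParseData (data : String) : PySem.Dict (Int × Int) (Int × Int × Bool) :=
  let line_list := PySem.Str.splitlines data
  let node_list : List (Int × Int × Bool) :=
    (PySem.List.enumerate line_list).foldl (fun acc rl =>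
      (PySem.List.enumerate rl.2.toList).foldl (fun acc cc =>
        acc ++ [(rl.1, cc.1, cc.2 == '@')]) acc) []
  node_list.foldl (fun d n => d.insert (n.1, n.2.1) n) PySem.Dict.empty

def pvGetNodeNeighborCoordinates (node : Int × Int × Bool) : List (Int × Int) :=
  pvDeltas.foldl (fun acc d => acc ++ [(node.1 + d.1, node.2.1 + d.2)]) []

def pvCreateGraph (node_dict : PySem.Dict (Int × Int) (Int × Int × Bool)) :
    PySem.Dict (Int × Int × Bool) (List (Int × Int × Bool)) :=
  node_dict.values.foldl (fun output_dict node =>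
    let neighbor_list := (pvGetNodeNeighborCoordinates node).foldl (fun acc q =>
      match node_dict.get? q with       -- try/except KeyError: continue
      | some n => acc ++ [n]
      | none => acc) []
    output_dict.insert node neighbor_list) PySem.Dict.empty

def pvFindAccessiblePaperRolls (node_dict : PySem.Dict (Int × Int) (Int × Int × Bool)) :
    List (Int × Int × Bool) :=
  let graph := pvCreateGraph node_dict
  graph.keys.filter (fun node =>
    node.2.2 && decide (((graph.getD node []).filter (fun n => n.2.2)).length < 4))

-- 'while True': one round per removable roll plus one final round suffices, so the fuel
-- (initial paper count + 1) is never exhausted on the Python's reachable states.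
def pvLoopA (node_dict : PySem.Dict (Int × Int) (Int × Int × Bool)) (rolls_removed : Int) :
    Nat → Int
  | 0 => rolls_removed
  | fuel + 1 =>
    let accessible := pvFindAccessiblePaperRolls node_dict
    if accessible.length = 0 then rolls_removed
    else
      let new_empty := accessible.map (fun n => (n.1, n.2.1, false))
      let st := new_empty.foldl (fun s n => (s.1.insert (n.1, n.2.1) n, s.2 + 1))
        (node_dict, rolls_removed)
      pvLoopA st.1 st.2 fuel

def part_two (data : String) : Int :=
  let node_dict := pvParseData data
  pvLoopA node_dict 0 ((node_dict.values.filter (fun n => n.2.2)).length + 1)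

-- ===== PORT B =====
-- B's module-level DELTAS tuple
def pvDeltasB : List (Int × Int) :=
  [(-1, 0), (-1, 1), (0, 1), (1, 1), (1, 0), (1, -1), (0, -1), (-1, -1)]

-- 'while stack': every step either pops without removing (stack shrinks by 1) or removes a live
-- cell (live shrinks by 1, stack grows by 7), so the measure 9*|live| + |stack| strictly drops
-- and the fuel 10*|papers| + 1 is never exhausted on the Python's reachable states.
-- 'p = stack.pop()' pops the LAST element: getLast? / dropLast.
def pvLoopW (live : PySem.Set (Int × Int)) (stack : List (Int × Int)) (removed : Int) :
    Nat → Int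
  | 0 => removed
  | fuel + 1 =>
    match stack.getLast? with
    | none => removed
    | some p =>
      let stack' := stack.dropLast
      if p ∈ live ∧ (pvDeltasB.map (fun d =>
            if (p.1 + d.1, p.2 + d.2) ∈ live then (1 : Int) else 0)).sum < 4 then
        pvLoopW (PySem.Set.discard live p)
          (pvDeltasB.foldl (fun st d => st ++ [(p.1 + d.1, p.2 + d.2)]) stack')
          (removed + 1) fuel
      else
        pvLoopW live stack' removed fuel

def part_two_alt (data : String) : Int :=
  let papers : List (Int × Int) :=
    (PySem.List.enumerate (PySem.Str.splitlines data)).flatMap (fun rl =>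
      (PySem.List.enumerate rl.2.toList).filterMap (fun cc =>
        if cc.2 == '@' then some (rl.1, cc.1) else none))
  pvLoopW (PySem.Set.ofList papers) papers 0 (10 * papers.length + 1)

-- ===== PRECONDITION & SPEC =====
def Spec_part_two (data : String) (out : Int) : Prop := out = part_two_alt data
instance (data : String) (out : Int) : Decidable (Spec_part_two data out) := by unfold Spec_part_two; infer_instance

-- ===== CLAIM (what is proved, stated in full; the proofs are below) =====
def Claim_equal_part_two : Prop := ∀ (data : String), Dom_part_two data → Spec_part_two data (part_two data)



-- ===== LEMMAS AND PROOFS =====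

-- the value A's dict stores at coordinate k when the live paper set is `papers`
def pvVal (papers : List (Int × Int)) (k : Int × Int) : Int × Int × Bool :=
  (k.1, k.2, decide (k ∈ papers))

def pvNbr (p : Int × Int) : List (Int × Int) :=
  pvDeltas.map (fun d => (p.1 + d.1, p.2 + d.2))

-- number of live paper neighbours of p when the live set is `papers`
def pvCnt (papers : List (Int × Int)) (p : Int × Int) : Nat :=
  (pvNbr p).countP (fun q => decide (q ∈ papers))

def pvCells (data : String) : List ((Int × Int) × Char) :=
  (PySem.List.enumerate (PySem.Str.splitlines data)).flatMap (fun rl =>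
    (PySem.List.enumerate rl.2.toList).map (fun cc => ((rl.1, cc.1), cc.2)))

-- the inner neighbour-collecting loop of create_graph, as a named function
def pvNlist (nd : PySem.Dict (Int × Int) (Int × Int × Bool)) (node : Int × Int × Bool) :
    List (Int × Int × Bool) :=
  (pvGetNodeNeighborCoordinates node).foldl (fun acc q =>
    match nd.get? q with
    | some n => acc ++ [n]
    | none => acc) []

-- the round-based pure peeling process A reduces to (proof device, not a port)
def pvLoopR (papers : List (Int × Int)) (removed : Int) : Nat → Int
  | 0 => removed
  | fuel + 1 =>
    if papers = [] then removed
    else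
      let keep := papers.filter (fun p => !decide (pvCnt papers p < 4))
      if keep.length = papers.length then removed
      else pvLoopR keep (removed + ((papers.length : Int) - (keep.length : Int))) fuel

-- a set is stable (pvGood) when every cell in it keeps ≥ 4 neighbours inside it: it can never be peeled
def pvGood (S : List (Int × Int)) : Prop := ∀ p ∈ S, 4 ≤ pvCnt S p

theorem pvVal_injective (papers : List (Int × Int)) : Function.Injective (pvVal papers) := by
  intro a b h
  simp only [pvVal, Prod.mk.injEq] at h
  exact Prod.ext h.1 h.2.1

theorem pv_filter_mem_of_sublist {l' l : List (Int × Int)}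
    (h : l'.Sublist l) (hn : l.Nodup) :
    l.filter (fun x => decide (x ∈ l')) = l' := by
  induction h with
  | slnil => rfl
  | @cons l₁ l₂ a h ih =>
    have ha : a ∉ l₁ := fun hm => (List.nodup_cons.mp hn).1 (h.mem hm)
    rw [List.filter_cons, if_neg (by simp [ha]), ih (List.nodup_cons.mp hn).2]
  | @cons₂ l₁ l₂ a h ih =>
    have ha2 : a ∉ l₂ := (List.nodup_cons.mp hn).1
    rw [List.filter_cons, if_pos (by simp)]
    rw [List.filter_congr (q := fun x => decide (x ∈ l₁)) (fun x hx => by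
      have hne : x ≠ a := fun he => ha2 (he ▸ hx)
      simp [hne])]
    rw [ih (List.nodup_cons.mp hn).2]

theorem pv_snd_unique {α β : Type} {l : List (α × β)} (hn : (l.map Prod.fst).Nodup)
    {k : α} {b c : β} (h1 : (k, b) ∈ l) (h2 : (k, c) ∈ l) : b = c := by
  induction l with
  | nil => simp at h1
  | cons a t ih =>
    rw [List.map_cons, List.nodup_cons] at hn
    rcases List.mem_cons.mp h1 with h1 | h1 <;> rcases List.mem_cons.mp h2 with h2 | h2
    · rw [← h1] at h2; exact (Prod.mk.injEq _ _ _ _ ▸ h2).2.symm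
    · exfalso; apply hn.1; rw [← h1]; exact (List.mem_map_of_mem h2 : (k, c).1 ∈ _)
    · exfalso; apply hn.1; rw [← h2]; exact (List.mem_map_of_mem h1 : (k, b).1 ∈ _)
    · exact ih hn.2 h1 h2

theorem pv_get?_struct (nd : PySem.Dict (Int × Int) (Int × Int × Bool))
    (grid papers : List (Int × Int)) (hg : grid.Nodup)
    (hitems : nd.items = grid.map (fun k => (k, pvVal papers k))) (q : Int × Int) :
    nd.get? q = if q ∈ grid then some (pvVal papers q) else none := by
  have hkeys : nd.keys = grid := by
    simp only [PySem.Dict.keys, hitems, List.map_map]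
    show List.map (fun k => k) grid = grid
    exact List.map_id' grid
  split
  · next hq =>
    exact PySem.Dict.get?_of_mem_items nd
      (by rw [hitems]; exact List.mem_map_of_mem hq) (by rw [hkeys]; exact hg)
  · next hq =>
    rw [PySem.Dict.get?_eq_none_iff_not_mem_keys, hkeys]
    exact hq

theorem pv_nbr_coords (papers : List (Int × Int)) (p : Int × Int) :
    pvGetNodeNeighborCoordinates (pvVal papers p) = pvNbr p := by
  unfold pvGetNodeNeighborCoordinates
  rw [PySem.List.foldl_append_singleton_eq_map]
  simp [pvNbr, pvVal]

theorem pv_count_nbrs (nd : PySem.Dict (Int × Int) (Int × Int × Bool))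
    (grid papers : List (Int × Int)) (hg : grid.Nodup)
    (hitems : nd.items = grid.map (fun k => (k, pvVal papers k)))
    (hsub : ∀ x ∈ papers, x ∈ grid) (qs : List (Int × Int)) (acc : List (Int × Int × Bool)) :
    ((qs.foldl (fun acc q => match nd.get? q with
        | some n => acc ++ [n]
        | none => acc) acc).filter (fun n => n.2.2)).length
      = (acc.filter (fun n => n.2.2)).length + qs.countP (fun q => decide (q ∈ papers)) := by
  induction qs generalizing acc with
  | nil => simp
  | cons q qs ih =>
    rw [List.foldl_cons, List.countP_cons, ih]
    rw [pv_get?_struct nd grid papers hg hitems q]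
    by_cases hq : q ∈ grid
    · rw [if_pos hq]
      by_cases hp : q ∈ papers
      · simp [pvVal, hp, List.filter_append]; omega
      · simp [pvVal, hp, List.filter_append]
    · rw [if_neg hq]
      have hp : q ∉ papers := fun h => hq (hsub q h)
      simp [hp]

theorem pv_accessible_eq (nd : PySem.Dict (Int × Int) (Int × Int × Bool))
    (grid papers : List (Int × Int)) (hg : grid.Nodup) (hsub : papers.Sublist grid)
    (hitems : nd.items = grid.map (fun k => (k, pvVal papers k))) :
    pvFindAccessiblePaperRolls nd
      = (papers.filter (fun p => decide (pvCnt papers p < 4))).map (pvVal papers) := by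
  have hvals : nd.values = grid.map (pvVal papers) := by
    simp only [PySem.Dict.values, hitems, List.map_map]
    rfl
  have hvnd : nd.values.Nodup := by rw [hvals]; exact hg.map (pvVal_injective papers)
  have hgraph : pvCreateGraph nd
      = nd.values.foldl (fun g node => g.insert node (pvNlist nd node)) PySem.Dict.empty := rfl
  have hitemsG : (pvCreateGraph nd).items
      = nd.values.map (fun node => (node, pvNlist nd node)) := by
    rw [hgraph]
    have := PySem.Dict.items_foldl_insert_fresh (κ := Int × Int × Bool)
      (ν := List (Int × Int × Bool)) nd.values (fun node => node) (pvNlist nd) PySem.Dict.empty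
      (by intro a _; simp [PySem.Dict.contains_empty]) (by simpa using hvnd)
    simpa using this
  have hkeysG : (pvCreateGraph nd).keys = nd.values := by
    simp only [PySem.Dict.keys, hitemsG, List.map_map]
    show List.map (fun node => node) nd.values = nd.values
    exact List.map_id' nd.values
  have hkndG : (pvCreateGraph nd).keys.Nodup := by rw [hkeysG]; exact hvnd
  have hgetD : ∀ node ∈ nd.values, (pvCreateGraph nd).getD node [] = pvNlist nd node := by
    intro node hm
    exact PySem.Dict.getD_of_mem_items _ (by rw [hitemsG]; exact List.mem_map_of_mem hm) hkndG []
  have hFA : pvFindAccessiblePaperRolls nd = (pvCreateGraph nd).keys.filter (fun node =>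
      node.2.2 && decide ((((pvCreateGraph nd).getD node []).filter (fun n => n.2.2)).length < 4)) := rfl
  rw [hFA, hkeysG]
  rw [List.filter_congr (q := fun node =>
      node.2.2 && decide (((pvNlist nd node).filter (fun n => n.2.2)).length < 4))
    (fun node hm => by rw [hgetD node hm])]
  rw [hvals]
  rw [List.filter_map]
  have hcomp : ((fun node => node.2.2 &&
        decide (((pvNlist nd node).filter (fun n => n.2.2)).length < 4)) ∘ pvVal papers)
      = fun k => decide (pvCnt papers k < 4) && decide (k ∈ papers) := by
    funext k
    simp only [Function.comp]
    have h1 : (pvVal papers k).2.2 = decide (k ∈ papers) := rfl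
    have h2 : ((pvNlist nd (pvVal papers k)).filter (fun n => n.2.2)).length = pvCnt papers k := by
      unfold pvNlist
      rw [pv_nbr_coords]
      have := pv_count_nbrs nd grid papers hg hitems (fun x hx => hsub.mem hx) (pvNbr k) []
      simpa [pvCnt] using this
    rw [h1, h2, Bool.and_comm]
  rw [hcomp]
  rw [← List.filter_filter, pv_filter_mem_of_sublist hsub hg]

theorem pv_items_update (peel : List (Int × Int)) :
    ∀ (grid : List (Int × Int)) (f : (Int × Int) → Int × Int × Bool)
      (nd : PySem.Dict (Int × Int) (Int × Int × Bool)),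
    nd.items = grid.map (fun k => (k, f k)) →
    (∀ x ∈ peel, x ∈ grid) →
    (peel.foldl (fun d k => d.insert (k.1, k.2) (k.1, k.2, false)) nd).items
      = grid.map (fun k => (k, if k ∈ peel then (k.1, k.2, false) else f k)) := by
  induction peel with
  | nil =>
    intro grid f nd hitems _
    simpa using hitems
  | cons k0 peel ih =>
    intro grid f nd hitems hsub
    rw [List.foldl_cons]
    have hkeys : nd.keys = grid := by
      simp only [PySem.Dict.keys, hitems, List.map_map]
      show List.map (fun k => k) grid = grid
      exact List.map_id' grid
    have hcont : nd.contains (k0.1, k0.2) = true := by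
      rw [PySem.Dict.contains_eq_decide_mem_keys, hkeys]
      simp only [decide_eq_true_eq]
      exact hsub k0 List.mem_cons_self
    have hins : (nd.insert (k0.1, k0.2) (k0.1, k0.2, false)).items
        = grid.map (fun k => (k, if k = k0 then (k0.1, k0.2, false) else f k)) := by
      rw [PySem.Dict.items_insert_of_contains nd _ hcont, hitems, List.map_map]
      apply List.map_congr_left
      intro k _
      by_cases hk : k = k0
      · subst hk; simp
      · have : ((k, f k).1 == (k0.1, k0.2)) = false := by
          simpa using hk
        simp only [Function.comp, this]
        simp [hk]
    rw [ih grid _ _ hins (fun x hx => hsub x (List.mem_cons_of_mem _ hx))]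
    apply List.map_congr_left
    intro k _
    by_cases h1 : k ∈ peel <;> by_cases h2 : k = k0 <;>
      simp [h1, h2, List.mem_cons]

theorem pv_loop_eq (fuel : Nat) :
    ∀ (grid papers : List (Int × Int)) (nd : PySem.Dict (Int × Int) (Int × Int × Bool))
      (removed : Int),
    grid.Nodup → papers.Sublist grid →
    nd.items = grid.map (fun k => (k, pvVal papers k)) →
    pvLoopA nd removed fuel = pvLoopR papers removed fuel := by
  induction fuel with
  | zero => intro grid papers nd removed _ _ _; rfl
  | succ fuel ih =>
    intro grid papers nd removed hg hsub hitems
    have hacc := pv_accessible_eq nd grid papers hg hsub hitems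
    simp only [pvLoopA, pvLoopR]
    rw [hacc]
    set peel := papers.filter (fun p => decide (pvCnt papers p < 4)) with hpeel
    set keep := papers.filter (fun p => !decide (pvCnt papers p < 4)) with hkeep
    have hlen : papers.length = peel.length + keep.length :=
      List.length_eq_length_filter_add (fun p => decide (pvCnt papers p < 4))
    have hkeepsub : keep.Sublist papers := List.filter_sublist
    have hpeelmem : ∀ x ∈ peel, x ∈ papers := fun x hx => (List.mem_filter.mp hx).1
    by_cases hpnil : papers = []
    · subst hpnil
      simp [hpeel]
    · rw [if_neg hpnil]
      by_cases hpeelnil : peel = []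
      · have hkl : keep.length = papers.length := by rw [hlen, hpeelnil]; simp
        rw [if_pos hkl, hpeelnil]
        simp
      · have hpl : peel.length ≠ 0 := fun h => hpeelnil (List.length_eq_zero_iff.mp h)
        rw [if_neg (by simpa using hpl), if_neg (by omega)]
        rw [List.map_map]
        have hco : ((fun n => (n.1, n.2.1, false)) ∘ pvVal papers)
            = fun (k : Int × Int) => (k.1, k.2, false) := rfl
        rw [hco]
        have hsplit : ∀ (l : List (Int × Int × Bool))
            (d : PySem.Dict (Int × Int) (Int × Int × Bool)) (r : Int),
            l.foldl (fun s n => (s.1.insert (n.1, n.2.1) n, s.2 + 1)) (d, r)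
              = (l.foldl (fun d n => d.insert (n.1, n.2.1) n) d, r + l.length) := by
          intro l
          induction l with
          | nil => intro d r; simp
          | cons n t iht =>
            intro d r
            rw [List.foldl_cons, List.foldl_cons, iht]
            simp only [Prod.mk.injEq, List.length_cons]
            exact ⟨trivial, by push_cast; ring⟩
        rw [hsplit]
        have e1 : (peel.map (fun (k : Int × Int) => ((k.1 : Int), (k.2 : Int), false))).foldl
            (fun d (n : Int × Int × Bool) => d.insert (n.1, n.2.1) n) nd
            = peel.foldl (fun d k => d.insert (k.1, k.2) (k.1, k.2, false)) nd := by
          rw [List.foldl_map]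
        have hitems' : (peel.foldl (fun d k => d.insert (k.1, k.2) (k.1, k.2, false)) nd).items
            = grid.map (fun k => (k, pvVal keep k)) := by
          rw [pv_items_update peel grid (pvVal papers) nd hitems
            (fun x hx => hsub.mem (hpeelmem x hx))]
          apply List.map_congr_left
          intro k _
          congr 1
          by_cases h1 : k ∈ peel
          · have h2 : k ∉ keep := by
              intro hk
              have hnc := (List.mem_filter.mp hk).2
              have hc := (List.mem_filter.mp h1).2
              simp at hnc hc
              omega
            simp [h1, pvVal, h2]
          · have hiff : (k ∈ keep) ↔ k ∈ papers := by
              constructor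
              · intro hk; exact (List.mem_filter.mp hk).1
              · intro hp
                refine List.mem_filter.mpr ⟨hp, ?_⟩
                have hnc : ¬ (decide (pvCnt papers k < 4) = true) := fun hc =>
                  h1 (List.mem_filter.mpr ⟨hp, hc⟩)
                simpa using hnc
            by_cases hp : k ∈ papers
            · simp [h1, pvVal, hiff.mpr hp, hp]
            · have h2 : k ∉ keep := fun hk => hp (hiff.mp hk)
              simp [h1, pvVal, h2, hp]
        rw [e1]
        have e2 : removed + (((peel.map (fun (k : Int × Int) => ((k.1 : Int), (k.2 : Int), false))).length : Int))
            = removed + ((papers.length : Int) - (keep.length : Int)) := by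
          simp only [List.length_map]
          have h := hlen
          omega
        rw [e2]
        exact ih grid keep _ _ hg (hkeepsub.trans hsub) hitems'

theorem pv_filterMap_if {α β : Type} (p : α → Bool) (f : α → β) (l : List α) :
    l.filterMap (fun x => if p x then some (f x) else none) = (l.filter p).map f := by
  induction l with
  | nil => rfl
  | cons a t ih => by_cases h : p a <;> simp [h, ih]

theorem pv_cells_fst_nodup (data : String) : ((pvCells data).map Prod.fst).Nodup := by
  unfold pvCells
  rw [List.map_flatMap, List.nodup_flatMap]
  constructor
  · intro rl _
    rw [List.map_map]
    exact ((PySem.List.pairwise_lt_enumerate rl.2.toList 0).map _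
      (fun a b (h : a.1 < b.1) => by
        show ((rl.1, a.1) : Int × Int) ≠ (rl.1, b.1)
        simp only [ne_eq, Prod.mk.injEq, not_and]
        intro _ h2
        omega))
  · refine (PySem.List.pairwise_lt_enumerate (PySem.Str.splitlines data) 0).imp ?_
    intro a b (hab : a.1 < b.1) x hxa hxb
    simp only [List.map_map, List.mem_map, Function.comp] at hxa hxb
    rcases hxa with ⟨ca, _, hca⟩
    rcases hxb with ⟨cb, _, hcb⟩
    have h1 : x.1 = a.1 := by rw [← hca]
    have h2 : x.1 = b.1 := by rw [← hcb]
    omega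

theorem pv_cells_node_list (data : String) :
    (PySem.List.enumerate (PySem.Str.splitlines data)).foldl (fun acc rl =>
        (PySem.List.enumerate rl.2.toList).foldl (fun acc cc =>
          acc ++ [(rl.1, cc.1, cc.2 == '@')]) acc) []
      = (pvCells data).map (fun c => (c.1.1, c.1.2, c.2 == '@')) := by
  rw [PySem.List.foldl_congr_mem (PySem.List.enumerate (PySem.Str.splitlines data))
    (fun acc rl => (PySem.List.enumerate rl.2.toList).foldl
      (fun acc cc => acc ++ [(rl.1, cc.1, cc.2 == '@')]) acc)
    (fun acc rl => acc ++
      (PySem.List.enumerate rl.2.toList).map (fun cc => ((rl.1 : Int), (cc.1 : Int), cc.2 == '@')))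
    []
    (fun acc rl _ => PySem.List.foldl_append_singleton_eq_map _ _ _)]
  rw [PySem.List.foldl_append_eq_flatMap]
  unfold pvCells
  rw [List.map_flatMap, List.nil_append]
  apply List.flatMap_congr
  intro rl _
  rw [List.map_map]
  rfl

theorem pv_papersB_eq (data : String) :
    (PySem.List.enumerate (PySem.Str.splitlines data)).flatMap (fun rl =>
        (PySem.List.enumerate rl.2.toList).filterMap (fun cc =>
          if cc.2 == '@' then some (rl.1, cc.1) else none))
      = ((pvCells data).filter (fun c => c.2 == '@')).map Prod.fst := by
  unfold pvCells
  rw [List.filter_flatMap, List.map_flatMap]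
  apply List.flatMap_congr
  intro rl _
  rw [pv_filterMap_if, List.filter_map, List.map_map]
  rfl

theorem pv_mem_papers_iff {cells : List ((Int × Int) × Char)}
    (hn : (cells.map Prod.fst).Nodup) {c : (Int × Int) × Char} (hc : c ∈ cells) :
    c.1 ∈ (cells.filter (fun c => c.2 == '@')).map Prod.fst ↔ c.2 = '@' := by
  constructor
  · intro hm
    rcases List.mem_map.mp hm with ⟨c', hc', he⟩
    rcases List.mem_filter.mp hc' with ⟨hc'm, hp⟩
    have h1 : (c.1, c'.2) ∈ cells := by
      rw [show ((c.1, c'.2) : (Int × Int) × Char) = c' from Prod.ext he.symm rfl]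
      exact hc'm
    have h2 : (c.1, c.2) ∈ cells := by
      rw [show ((c.1, c.2) : (Int × Int) × Char) = c from rfl]
      exact hc
    have := pv_snd_unique hn h1 h2
    rw [← this]
    simpa using hp
  · intro h
    exact List.mem_map_of_mem (List.mem_filter.mpr ⟨hc, by simp [h]⟩)

theorem pv_parse_items (data : String) :
    (pvParseData data).items = ((pvCells data).map Prod.fst).map
      (fun k => (k, pvVal (((pvCells data).filter (fun c => c.2 == '@')).map Prod.fst) k)) := by
  have hPD : pvParseData data = ((pvCells data).map (fun c => (c.1.1, c.1.2, c.2 == '@'))).foldl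
      (fun d n => d.insert (n.1, n.2.1) n) PySem.Dict.empty :=
    congrArg (fun l => l.foldl (fun d n => d.insert (n.1, n.2.1) n) PySem.Dict.empty)
      (pv_cells_node_list data)
  have hknd : (((pvCells data).map (fun c => (c.1.1, c.1.2, c.2 == '@'))).map
      (fun n => ((n.1 : Int), (n.2.1 : Int)))).Nodup := by
    rw [List.map_map]
    exact pv_cells_fst_nodup data
  have hfresh := PySem.Dict.items_foldl_insert_fresh (κ := Int × Int) (ν := Int × Int × Bool)
    ((pvCells data).map (fun c => (c.1.1, c.1.2, c.2 == '@'))) (fun n => (n.1, n.2.1))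
    (fun n => n) PySem.Dict.empty (by intro a _; simp [PySem.Dict.contains_empty]) hknd
  rw [hPD, hfresh]
  rw [List.map_map, List.map_map]
  apply List.map_congr_left
  intro c hc
  show ((c.1.1, c.1.2), (c.1.1, c.1.2, c.2 == '@'))
      = (c.1, pvVal (((pvCells data).filter (fun c => c.2 == '@')).map Prod.fst) c.1)
  have hiff := pv_mem_papers_iff (pv_cells_fst_nodup data) hc
  by_cases h : c.2 = '@'
  · simp [pvVal, hiff.mpr h, h]
  · have : c.1 ∉ ((pvCells data).filter (fun c => c.2 == '@')).map Prod.fst :=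
      fun hm => h (hiff.mp hm)
    simp [pvVal, this, h]

-- ===== confluence of the peeling process =====

-- membership in the 8-neighbourhood is a box condition
theorem pv_mem_nbr_iff (p q : Int × Int) :
    q ∈ pvNbr p ↔ (¬(q.1 = p.1 ∧ q.2 = p.2) ∧ p.1 - 1 ≤ q.1 ∧ q.1 ≤ p.1 + 1
      ∧ p.2 - 1 ≤ q.2 ∧ q.2 ≤ p.2 + 1) := by
  simp only [pvNbr, pvDeltas, List.map_cons, List.map_nil, List.mem_cons,
    List.not_mem_nil, or_false, Prod.ext_iff]
  omega

theorem pv_nbr_symm (p q : Int × Int) : q ∈ pvNbr p ↔ p ∈ pvNbr q := by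
  rw [pv_mem_nbr_iff, pv_mem_nbr_iff]
  omega

theorem pv_cnt_mono {S L : List (Int × Int)} (h : ∀ x ∈ S, x ∈ L) (p : Int × Int) :
    pvCnt S p ≤ pvCnt L p :=
  List.countP_mono_left (by intro q _ hq; simp at hq ⊢; exact h q hq)

theorem pv_cnt_discard_of_not_nbr {L : List (Int × Int)} {p q : Int × Int}
    (h : p ∉ pvNbr q) : pvCnt (PySem.Set.discard L p) q = pvCnt L q := by
  apply List.countP_congr
  intro x hx
  have hne : x ≠ p := fun he => h (he ▸ hx)
  simp [PySem.Set.mem_discard, hne]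

theorem pv_discard_length {L : List (Int × Int)} {p : Int × Int}
    (h : p ∈ L) (hn : L.Nodup) : (PySem.Set.discard L p).length + 1 = L.length := by
  have e1 : (PySem.Set.discard L p).length = L.countP (fun y => !(y == p)) := by
    simp only [PySem.Set.discard]
    exact (List.countP_eq_length_filter ..).symm
  rw [e1]
  have h1 := List.length_eq_countP_add_countP (fun y => !(y == p)) (l := L)
  simp only [] at h1
  have h2 : L.countP (fun a => decide ¬((!(a == p)) = true)) = L.count p := by
    rw [show L.count p = L.countP (fun y => y == p) from rfl]
    exact List.countP_congr (by intro a _; simp)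
  have h3 : L.count p = 1 := List.count_eq_one_of_mem hn h
  omega

theorem pv_nodup_length_eq {F G : List (Int × Int)} (hF : F.Nodup) (hG : G.Nodup)
    (h1 : ∀ x ∈ F, x ∈ G) (h2 : ∀ x ∈ G, x ∈ F) : F.length = G.length :=
  Nat.le_antisymm (List.subperm_of_subset hF h1).length_le
    (List.subperm_of_subset hG h2).length_le

-- the round process returns removed + (|papers| − |F|) where F is the greatest stable subset
theorem pv_roundSpec (fuel : Nat) :
    ∀ (papers : List (Int × Int)) (removed : Int), papers.Nodup → papers.length < fuel →
    ∃ F : List (Int × Int), F.Nodup ∧ (∀ x ∈ F, x ∈ papers) ∧ pvGood F ∧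
      (∀ S : List (Int × Int), (∀ x ∈ S, x ∈ papers) → pvGood S → ∀ x ∈ S, x ∈ F) ∧
      pvLoopR papers removed fuel = removed + ((papers.length : Int) - (F.length : Int)) := by
  induction fuel with
  | zero => intro papers removed _ h; omega
  | succ fuel ih =>
    intro papers removed hnd hlt
    by_cases hpnil : papers = []
    · refine ⟨[], by simp, by simp, by intro p hp; simp at hp, ?_, ?_⟩
      · intro S hS _ x hx; exact absurd (hpnil ▸ hS x hx) (List.not_mem_nil)
      · simp [pvLoopR, hpnil]
    · set keep := papers.filter (fun p => !decide (pvCnt papers p < 4)) with hkeep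
      by_cases hkl : keep.length = papers.length
      · have hkeq : keep = papers := (List.filter_sublist).eq_of_length hkl
        refine ⟨papers, hnd, fun x hx => hx, ?_, fun S hS _ x hx => hS x hx, ?_⟩
        · intro p hp
          have := List.mem_filter.mp (hkeq ▸ hp : p ∈ keep)
          have := this.2
          simp at this
          omega
        · simp only [pvLoopR, if_neg hpnil, ← hkeep, if_pos hkl]
          omega
      · have hksub : keep.Sublist papers := List.filter_sublist
        have hklt : keep.length < papers.length :=
          Nat.lt_of_le_of_ne (hksub.length_le) hkl
        obtain ⟨F, hFnd, hFsub, hFgood, hFmax, hFval⟩ :=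
          ih keep (removed + ((papers.length : Int) - (keep.length : Int)))
            (hnd.sublist hksub) (by omega)
        refine ⟨F, hFnd, fun x hx => hksub.mem (hFsub x hx), hFgood, ?_, ?_⟩
        · intro S hS hSgood x hx
          refine hFmax S ?_ hSgood x hx
          intro y hy
          refine List.mem_filter.mpr ⟨hS y hy, ?_⟩
          have h4 : 4 ≤ pvCnt S y := hSgood y hy
          have hm := pv_cnt_mono hS y
          simp
          omega
        · simp only [pvLoopR, if_neg hpnil, ← hkeep, if_neg hkl]
          rw [hFval]
          have : F.length ≤ keep.length :=
            (List.subperm_of_subset hFnd hFsub).length_le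
          omega

-- converting B's 0/1-sum over the deltas into the neighbour count
theorem pv_sum_eq_cnt (live : List (Int × Int)) (p : Int × Int) :
    (pvDeltasB.map (fun d =>
        if (p.1 + d.1, p.2 + d.2) ∈ live then (1 : Int) else 0)).sum
      = (pvCnt live p : Int) := by
  have hBA : pvDeltasB = pvDeltas := rfl
  have hmap : pvDeltasB.map (fun d =>
        if (p.1 + d.1, p.2 + d.2) ∈ live then (1 : Int) else 0)
      = (pvNbr p).map (fun q => if (fun q => decide (q ∈ live)) q = true then (1 : Int) else 0) := by
    rw [hBA]
    simp only [pvNbr, List.map_map]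
    apply List.map_congr_left
    intro d _
    by_cases hm : (p.1 + d.1, p.2 + d.2) ∈ live <;> simp [hm]
  rw [hmap, PySem.List.sum_map_ite_one_zero]
  rfl

-- the worklist process returns removed + (|live| − |F|) where F is the greatest stable subset,
-- provided every currently-peelable live cell is on the stack
theorem pv_stackSpec (fuel : Nat) :
    ∀ (live stack : List (Int × Int)) (removed : Int), live.Nodup →
    (∀ q ∈ live, pvCnt live q < 4 → q ∈ stack) →
    9 * live.length + stack.length < fuel →
    ∃ F : List (Int × Int), F.Nodup ∧ (∀ x ∈ F, x ∈ live) ∧ pvGood F ∧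
      (∀ S : List (Int × Int), (∀ x ∈ S, x ∈ live) → pvGood S → ∀ x ∈ S, x ∈ F) ∧
      pvLoopW live stack removed fuel = removed + ((live.length : Int) - (F.length : Int)) := by
  induction fuel with
  | zero => intro live stack removed _ _ h; omega
  | succ fuel ih =>
    intro live stack removed hnd hinv hlt
    rcases List.eq_nil_or_concat' stack with hsnil | ⟨s, p, hsp⟩
    · subst hsnil
      refine ⟨live, hnd, fun x hx => hx, ?_, fun S hS _ x hx => hS x hx, ?_⟩
      · intro q hq
        by_contra hc
        exact absurd (hinv q hq (by omega)) (List.not_mem_nil)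
      · show pvLoopW live [] removed (fuel + 1)
            = removed + ((live.length : Int) - (live.length : Int))
        simp [pvLoopW]
    · subst hsp
      have hglast : (s ++ [p]).getLast? = some p := by
        simp
      have hdrop : (s ++ [p]).dropLast = s := by
        simp
      by_cases hc : p ∈ live ∧ (pvDeltasB.map (fun d =>
          if (p.1 + d.1, p.2 + d.2) ∈ live then (1 : Int) else 0)).sum < 4
      · -- remove p
        have hpl : p ∈ live := hc.1
        have hcnt : pvCnt live p < 4 := by
          have := hc.2
          rw [pv_sum_eq_cnt] at this
          exact_mod_cast this
        have hlive' : (PySem.Set.discard live p).Nodup := PySem.Set.nodup_discard live p hnd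
        have hlen' := pv_discard_length hpl hnd
        have hstack' : pvDeltasB.foldl (fun st d => st ++ [(p.1 + d.1, p.2 + d.2)]) s
            = s ++ pvNbr p := by
          rw [PySem.List.foldl_append_singleton_eq_map]
          rfl
        have hmemD : ∀ x, x ∈ PySem.Set.discard live p ↔ x ∈ live ∧ x ≠ p := by
          intro x; exact PySem.Set.mem_discard ..
        have hinv' : ∀ q ∈ PySem.Set.discard live p,
            pvCnt (PySem.Set.discard live p) q < 4 → q ∈ s ++ pvNbr p := by
          intro q hq hqc
          obtain ⟨hql, hqp⟩ := (hmemD q).mp hq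
          by_cases hold : pvCnt live q < 4
          · have := hinv q hql hold
            rcases List.mem_append.mp this with h | h
            · exact List.mem_append.mpr (Or.inl h)
            · simp at h; exact absurd h hqp
          · have hpn : p ∈ pvNbr q := by
              by_contra hpn
              rw [pv_cnt_discard_of_not_nbr hpn] at hqc
              omega
            exact List.mem_append.mpr (Or.inr ((pv_nbr_symm p q).mpr hpn))
        have hmeas : 9 * (PySem.Set.discard live p).length + (s ++ pvNbr p).length < fuel := by
          have h8 : (pvNbr p).length = 8 := rfl
          simp only [List.length_append, h8]
          simp only [List.length_append, List.length_cons, List.length_nil] at hlt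
          omega
        obtain ⟨F, hFnd, hFsub, hFgood, hFmax, hFval⟩ :=
          ih (PySem.Set.discard live p) (s ++ pvNbr p) (removed + 1) hlive' hinv' hmeas
        refine ⟨F, hFnd, fun x hx => ((hmemD x).mp (hFsub x hx)).1, hFgood, ?_, ?_⟩
        · intro S hS hSgood x hx
          have hpS : p ∉ S := by
            intro hpS
            have h4 : 4 ≤ pvCnt S p := hSgood p hpS
            have := pv_cnt_mono hS p
            omega
          refine hFmax S ?_ hSgood x hx
          intro y hy
          exact (hmemD y).mpr ⟨hS y hy, fun he => hpS (he ▸ hy)⟩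
        · show pvLoopW live (s ++ [p]) removed (fuel + 1) = _
          rw [show pvLoopW live (s ++ [p]) removed (fuel + 1)
              = pvLoopW (PySem.Set.discard live p)
                  (pvDeltasB.foldl (fun st d => st ++ [(p.1 + d.1, p.2 + d.2)]) ((s ++ [p]).dropLast))
                  (removed + 1) fuel from by
            simp only [pvLoopW, hglast]
            rw [if_pos hc]]
          rw [hdrop, hstack', hFval]
          omega
      · -- skip p
        have hinv' : ∀ q ∈ live, pvCnt live q < 4 → q ∈ s := by
          intro q hql hqc
          rcases List.mem_append.mp (hinv q hql hqc) with h | h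
          · exact h
          · exfalso
            simp at h
            subst h
            apply hc
            refine ⟨hql, ?_⟩
            rw [pv_sum_eq_cnt]
            exact_mod_cast hqc
        have hmeas : 9 * live.length + s.length < fuel := by
          simp only [List.length_append, List.length_cons, List.length_nil] at hlt
          omega
        obtain ⟨F, hFnd, hFsub, hFgood, hFmax, hFval⟩ := ih live s removed hnd hinv' hmeas
        refine ⟨F, hFnd, hFsub, hFgood, hFmax, ?_⟩
        rw [show pvLoopW live (s ++ [p]) removed (fuel + 1)
            = pvLoopW live ((s ++ [p]).dropLast) removed fuel from by
          simp only [pvLoopW, hglast]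
          rw [if_neg hc]]
        rw [hdrop]
        exact hFval

-- ===== VERDICT (by name: the statement is the Claim_ definition above) =====
set_option maxHeartbeats 1000000 in
theorem part_two_spec : Claim_equal_part_two := by
  intro data _
  unfold Spec_part_two
  show part_two data = part_two_alt data
  have hnd := pv_cells_fst_nodup data
  set papers := ((pvCells data).filter (fun c => c.2 == '@')).map Prod.fst with hpapers
  have hsub : papers.Sublist ((pvCells data).map Prod.fst) := (List.filter_sublist).map Prod.fst
  have hpnd : papers.Nodup := hnd.sublist hsub
  have hitems := pv_parse_items data
  have hvals : (pvParseData data).values = ((pvCells data).map Prod.fst).map (pvVal papers) := by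
    simp only [PySem.Dict.values, hitems, List.map_map]
    rfl
  have hfuel : ((pvParseData data).values.filter (fun n => n.2.2)).length = papers.length := by
    rw [hvals, List.filter_map, List.length_map]
    rw [show ((fun (n : Int × Int × Bool) => n.2.2) ∘ pvVal papers)
      = fun k => decide (k ∈ papers) from rfl]
    rw [pv_filter_mem_of_sublist hsub hnd]
  have hA : part_two data = pvLoopR papers 0 (papers.length + 1) := by
    show pvLoopA (pvParseData data) 0
        (((pvParseData data).values.filter (fun n => n.2.2)).length + 1)
      = pvLoopR papers 0 (papers.length + 1)
    rw [hfuel]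
    exact pv_loop_eq _ ((pvCells data).map Prod.fst) papers (pvParseData data) 0 hnd hsub hitems
  have hB : part_two_alt data = pvLoopW papers papers 0 (10 * papers.length + 1) := by
    show pvLoopW (PySem.Set.ofList ((PySem.List.enumerate (PySem.Str.splitlines data)).flatMap _))
        _ 0 _ = _
    rw [pv_papersB_eq data, ← hpapers,
      show PySem.Set.ofList papers = papers from PySem.Set.ofList_eq_self_of_nodup papers hpnd]
  obtain ⟨F1, hF1nd, hF1sub, hF1good, hF1max, hF1val⟩ :=
    pv_roundSpec (papers.length + 1) papers 0 hpnd (by omega)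
  obtain ⟨F2, hF2nd, hF2sub, hF2good, hF2max, hF2val⟩ :=
    pv_stackSpec (10 * papers.length + 1) papers papers 0 hpnd
      (fun q hq _ => hq) (by omega)
  have h12 : ∀ x ∈ F1, x ∈ F2 := hF2max F1 hF1sub hF1good
  have h21 : ∀ x ∈ F2, x ∈ F1 := hF1max F2 hF2sub hF2good
  have hlen := pv_nodup_length_eq hF1nd hF2nd h12 h21
  rw [hA, hB, hF1val, hF2val, hlen]
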